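-- pv_equiv track=rewrite | github.com/lvhanh270597/vNLP | helpers/data.py | get_dict_feature
-- ===== SOURCE A (Python) =====
-- def get_dict_feature(sentence, refer, max_words):
--     words = sentence.split()
--     half = len(words) // 2
--     vector = []
--     for nsize in range(max_words, 0, -1):
--         for i in range(0, len(words) - nsize + 1):
--             last_index = i + nsize - 1
--             if (i <= half) and (last_index >= half):
--                 cur_word = ' '.join(words[i: last_index + 1])
--                 item = 1 if cur_word in refer else 0
--                 vector.append(item)
--     return vector
-- ===== SOURCE B (Python) =====
-- def get_dict_feature(sentence, refer, max_words):
--     # Grow window strings outward from the middle word via two precomputed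
--     # prefix tables (left joins ending at the middle word, right extensions with
--     # their leading space), so each window string is a single concatenation
--     # instead of a fresh join; refer is indexed once as a set.
--     words = sentence.split()
--     n = len(words)
--     if n == 0:
--         return []
--     half = n // 2
--     refer_set = set(refer)
--     # left[j] = ' '.join(words[half-j : half+1])
--     left = [words[half]]
--     for j in range(1, half + 1):
--         left.append(words[half - j] + ' ' + left[j - 1])
--     # rsp[r] = '' if r == 0 else ' ' + ' '.join(words[half+1 : half+1+r])
--     rsp = ['']
--     for r in range(1, n - half):
--         rsp.append(rsp[r - 1] + ' ' + words[half + r])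
--     vector = []
--     for nsize in range(min(max_words, n), 0, -1):
--         for i in range(max(0, half - nsize + 1), min(half, n - nsize) + 1):
--             s = left[half - i] + rsp[i + nsize - 1 - half]
--             vector.append(1 if s in refer_set else 0)
--     return vector
-- ===== Notes on version B (the rewrite author's own statement) =====
-- stated objective: alternative
-- what changed: B precomputes two prefix tables grown outward from the middle word (left joins ending at the middle word, right extensions carrying their leading space), assembles each window string as a single concatenation of two table entries instead of re-joining every window from scratch, iterates only the closed-form straddling start range per size instead of scanning and testing every start, and indexes refer once as a set instead of a per-window list scan.
import Mathlib
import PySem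

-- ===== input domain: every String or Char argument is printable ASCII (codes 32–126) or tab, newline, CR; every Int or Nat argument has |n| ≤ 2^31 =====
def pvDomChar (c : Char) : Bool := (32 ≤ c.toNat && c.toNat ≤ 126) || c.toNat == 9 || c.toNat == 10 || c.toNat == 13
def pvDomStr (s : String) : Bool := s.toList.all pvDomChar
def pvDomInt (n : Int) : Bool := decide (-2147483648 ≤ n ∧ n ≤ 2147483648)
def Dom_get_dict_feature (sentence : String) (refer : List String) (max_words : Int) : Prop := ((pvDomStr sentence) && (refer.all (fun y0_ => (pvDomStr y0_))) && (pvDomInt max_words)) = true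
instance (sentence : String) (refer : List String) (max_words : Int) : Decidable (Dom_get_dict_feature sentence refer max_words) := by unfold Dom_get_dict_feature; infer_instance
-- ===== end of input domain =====

-- B grows the window strings outward from the middle word via two precomputed prefix tables
-- (left joins ending at the middle word, right extensions carrying their leading space), so each
-- window string is one concatenation of two table entries instead of a fresh join, iterates only
-- the straddling start range (computed in closed form) for each size, and indexes refer once as a
-- set (objective: alternative).

-- ===== PORT A =====
def get_dict_feature (sentence : String) (refer : List String) (max_words : Int) : List Int :=
  let words := PySem.Str.split₀ sentence
  let half := PySem.Int.floordiv (PySem.List.len words) 2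
  (PySem.List.pyRange max_words 0 (-1)).foldl (fun vector nsize =>
    (PySem.List.pyRange 0 (PySem.List.len words - nsize + 1) 1).foldl (fun vector i =>
      let last_index := i + nsize - 1
      if i ≤ half ∧ last_index ≥ half then
        let cur_word := PySem.Str.join " " (PySem.List.slice words (some i) (some (last_index + 1)))
        vector ++ [if cur_word ∈ refer then (1 : Int) else 0]
      else vector) vector) []

-- ===== PORT B =====
-- Faithful port of Source B; Python's list indexing here is always in range (proved below), so the
-- '.getD ""' default of the Option-returning PySem.List.pyGet? is never taken.
def get_dict_feature_alt (sentence : String) (refer : List String) (max_words : Int) : List Int :=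
  let words := PySem.Str.split₀ sentence
  let n := PySem.List.len words
  if n = 0 then []
  else
    let half := PySem.Int.floordiv n 2
    let referSet := PySem.Set.ofList refer
    let left := (PySem.List.pyRange 1 (half + 1) 1).foldl
      (fun left j => left ++ [((PySem.List.pyGet? words (half - j)).getD "") ++ " " ++ ((PySem.List.pyGet? left (j - 1)).getD "")])
      [(PySem.List.pyGet? words half).getD ""]
    let rsp := (PySem.List.pyRange 1 (n - half) 1).foldl
      (fun rsp r => rsp ++ [((PySem.List.pyGet? rsp (r - 1)).getD "") ++ " " ++ ((PySem.List.pyGet? words (half + r)).getD "")])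
      [""]
    (PySem.List.pyRange (min max_words n) 0 (-1)).foldl (fun vector nsize =>
      (PySem.List.pyRange (max 0 (half - nsize + 1)) (min half (n - nsize) + 1) 1).foldl (fun vector i =>
        let s := ((PySem.List.pyGet? left (half - i)).getD "") ++ ((PySem.List.pyGet? rsp (i + nsize - 1 - half)).getD "")
        vector ++ [if s ∈ referSet then (1 : Int) else 0]) vector) []

-- ===== PRECONDITION & SPEC =====
def Spec_get_dict_feature (sentence : String) (refer : List String) (max_words : Int) (out : List Int) : Prop := out = get_dict_feature_alt sentence refer max_words
instance (sentence : String) (refer : List String) (max_words : Int) (out : List Int) : Decidable (Spec_get_dict_feature sentence refer max_words out) := by unfold Spec_get_dict_feature; infer_instance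

-- ===== CLAIM (what is proved, stated in full; the proofs are below) =====
def Claim_equal_get_dict_feature : Prop := ∀ (sentence : String) (refer : List String) (max_words : Int), Dom_get_dict_feature sentence refer max_words → Spec_get_dict_feature sentence refer max_words (get_dict_feature sentence refer max_words)

-- ===== LEMMAS AND PROOFS =====

-- the string of the j-th left prefix: ' '.join(words[half-j : half+1])
def LstrF (words : List String) (j : Nat) : String :=
  PySem.Str.join " " ((words.drop (words.length / 2 - j)).take (j + 1))

-- the char list of the r-th right extension with its leading spaces
def RtlF (words : List String) (r : Nat) : List Char :=
  ((((words.drop (words.length / 2 + 1)).take r)).map String.toList).flatMap (fun w => ' ' :: w)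

theorem floordiv_two_cast (m : Nat) : PySem.Int.floordiv (m : Int) 2 = ((m / 2 : Nat) : Int) := by
  exact_mod_cast PySem.Int.floordiv_natCast m 2

-- intercalate over a nonempty list, flatMap form
theorem intercalate_cons_flatMap (sep x : List Char) (b : List (List Char)) :
    List.intercalate sep (x :: b) = x ++ b.flatMap (fun w => sep ++ w) := by
  induction b generalizing x with
  | nil => simp [List.intercalate]
  | cons y t ih =>
    have h := PySem.Chars.join_cons_cons sep x y t
    simp only [PySem.Chars.join] at h
    rw [h, ih y]
    simp [List.append_assoc]

theorem intercalate_append_flatMap (sep : List Char) (a b : List (List Char)) (ha : a ≠ []) :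
    List.intercalate sep (a ++ b) = List.intercalate sep a ++ b.flatMap (fun w => sep ++ w) := by
  obtain ⟨x, a', rfl⟩ := List.exists_cons_of_ne_nil ha
  rw [List.cons_append, intercalate_cons_flatMap, intercalate_cons_flatMap]
  simp [List.append_assoc]

-- splitting a straddling window at the middle word
theorem window_split (words : List String) (iN k : Nat)
    (h1 : iN ≤ words.length / 2) (h2 : words.length / 2 < iN + k) (h3 : iN + k ≤ words.length) :
    (PySem.Str.join " " ((words.drop iN).take k)).toList
      = (LstrF words (words.length / 2 - iN)).toList ++ RtlF words (iN + k - 1 - words.length / 2) := by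
  have hm : 0 < words.length := by omega
  set h := words.length / 2 with hdef
  have hsplit : (words.drop iN).take k
      = (words.drop iN).take (h + 1 - iN) ++ (words.drop (h + 1)).take (iN + k - 1 - h) := by
    conv_lhs => rw [show k = (h + 1 - iN) + (iN + k - 1 - h) from by omega, List.take_add]
    rw [List.drop_drop, show iN + (h + 1 - iN) = h + 1 from by omega]
  rw [hsplit, PySem.Str.toList_join, List.map_append]
  have hne : ((words.drop iN).take (h + 1 - iN)).map String.toList ≠ [] := by
    simp only [ne_eq, ← List.length_eq_zero_iff, List.length_map, List.length_take,
      List.length_drop]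
    omega
  rw [show PySem.Chars.join " ".toList = List.intercalate " ".toList from rfl,
    intercalate_append_flatMap _ _ _ hne]
  congr 1
  rw [LstrF, PySem.Str.toList_join, ← hdef, show h - (h - iN) = iN from by omega,
    show (h - iN) + 1 = h + 1 - iN from by omega]
  rfl

-- a fold whose step fixes every value is the identity
theorem foldl_fixpoint {α β : Type} (f : β → α → β) (l : List α) (b : β)
    (h : ∀ v x, x ∈ l → f v x = v) : l.foldl f b = b := by
  induction l generalizing b with
  | nil => rfl
  | cons x t ih =>
    rw [List.foldl_cons, h b x (by simp)]
    exact ih b (fun v y hy => h v y (by simp [hy]))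

-- a range filtered by an interval condition is the clipped range
theorem filter_pyRange_interval (a b c d : Int) (p : Int → Bool)
    (hp : ∀ i, p i = true ↔ c ≤ i ∧ i ≤ d) :
    (PySem.List.pyRange a b 1).filter p = PySem.List.pyRange (max a c) (min b (d + 1)) 1 := by
  have h1 : ((PySem.List.pyRange a b 1).filter p).Pairwise (· < ·) :=
    (PySem.List.pairwise_lt_pyRange_one a b).filter p
  have h2 : (PySem.List.pyRange (max a c) (min b (d+1)) 1).Pairwise (· < ·) :=
    PySem.List.pairwise_lt_pyRange_one _ _
  have hmem : ∀ x, x ∈ (PySem.List.pyRange a b 1).filter p ↔ x ∈ PySem.List.pyRange (max a c) (min b (d+1)) 1 := by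
    intro x
    simp only [List.mem_filter, PySem.List.mem_pyRange_one, hp]
    omega
  have hperm := (List.perm_ext_iff_of_nodup h1.nodup h2.nodup).2 hmem
  exact PySem.List.eq_of_perm_of_pairwise_le_of_injective (fun x => x) (fun _ _ h => h) hperm
    (h1.imp le_of_lt) (h2.imp le_of_lt)

-- stage 1: A's scan-and-test over all sizes equals the clipped-range fold over sizes ≤ n
theorem fold_eq (words : List String) (refer : List String) (mw : Int) :
    List.foldl (fun vector nsize =>
      List.foldl (fun vector i =>
        if i ≤ ((words.length / 2 : Nat) : Int) ∧
            i + nsize - 1 ≥ ((words.length / 2 : Nat) : Int) then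
          vector ++ [if PySem.Str.join " " (PySem.List.slice words (some i) (some (i + nsize - 1 + 1))) ∈ refer then (1:Int) else 0]
        else vector) vector (PySem.List.pyRange 0 ((words.length : Int) - nsize + 1) 1))
      [] (PySem.List.pyRange mw 0 (-1))
    = List.foldl (fun vector nsize =>
      List.foldl (fun vector i =>
        vector ++ [if PySem.Str.join " " (PySem.List.slice words (some i) (some (i + nsize))) ∈ refer then (1:Int) else 0])
        vector (PySem.List.pyRange (max 0 (((words.length / 2 : Nat) : Int) - nsize + 1))
          (min ((words.length / 2 : Nat) : Int) ((words.length : Int) - nsize) + 1) 1))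
      [] (PySem.List.pyRange (min mw (words.length : Int)) 0 (-1)) := by
  have hstep : (fun (vector : List Int) (nsize : Int) =>
      List.foldl (fun vector i =>
        if i ≤ ((words.length / 2 : Nat) : Int) ∧
            i + nsize - 1 ≥ ((words.length / 2 : Nat) : Int) then
          vector ++ [if PySem.Str.join " " (PySem.List.slice words (some i) (some (i + nsize - 1 + 1))) ∈ refer then (1:Int) else 0]
        else vector) vector (PySem.List.pyRange 0 ((words.length : Int) - nsize + 1) 1))
    = (fun (vector : List Int) (nsize : Int) =>
      List.foldl (fun vector i =>
        vector ++ [if PySem.Str.join " " (PySem.List.slice words (some i) (some (i + nsize))) ∈ refer then (1:Int) else 0])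
        vector (PySem.List.pyRange (max 0 (((words.length / 2 : Nat) : Int) - nsize + 1))
          (min ((words.length / 2 : Nat) : Int) ((words.length : Int) - nsize) + 1) 1)) := by
    funext vector nsize
    rw [PySem.List.foldl_append_ite, PySem.List.foldl_append_singleton_eq_map]
    rw [filter_pyRange_interval 0 ((words.length : Int) - nsize + 1)
        (((words.length / 2 : Nat) : Int) - nsize + 1)
        ((words.length / 2 : Nat) : Int)
        _ (by intro i; simp; omega)]
    have hb : min ((words.length : Int) - nsize + 1)
        (((words.length / 2 : Nat) : Int) + 1)
        = min ((words.length / 2 : Nat) : Int) ((words.length : Int) - nsize) + 1 := by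
      omega
    rw [hb]
    congr 1
    apply List.map_congr_left
    intro i _
    have h2 : i + nsize - 1 + 1 = i + nsize := by ring
    rw [h2]
  rw [hstep]
  by_cases hmw : mw ≤ 0
  · rw [PySem.List.pyRange_neg_one_eq_nil hmw, PySem.List.pyRange_neg_one_eq_nil (by omega)]
  · rw [not_le] at hmw
    have hsplit : PySem.List.pyRange mw 0 (-1)
        = PySem.List.pyRange mw (min mw (words.length : Int)) (-1)
          ++ PySem.List.pyRange (min mw (words.length : Int)) 0 (-1) := by
      rw [PySem.List.pyRange_neg_one_eq_reverse, PySem.List.pyRange_neg_one_eq_reverse,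
        PySem.List.pyRange_neg_one_eq_reverse,
        PySem.List.pyRange_one_append (0 + 1) (min mw (words.length : Int) + 1) (mw + 1)
          (by omega) (by omega),
        List.reverse_append]
    have hid : List.foldl (fun (vector : List Int) (nsize : Int) =>
        List.foldl (fun vector i =>
          vector ++ [if PySem.Str.join " " (PySem.List.slice words (some i) (some (i + nsize))) ∈ refer then (1:Int) else 0])
          vector (PySem.List.pyRange (max 0 (((words.length / 2 : Nat) : Int) - nsize + 1))
            (min ((words.length / 2 : Nat) : Int) ((words.length : Int) - nsize) + 1) 1))
        [] (PySem.List.pyRange mw (min mw (words.length : Int)) (-1)) = [] := by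
      apply foldl_fixpoint
      intro v x hx
      rw [PySem.List.mem_pyRange_neg_one] at hx
      rw [PySem.List.pyRange_one_eq_nil (by omega)]
      rfl
    rw [hsplit, List.foldl_append, hid]

-- the left table built by B's first loop is the table of left-prefix joins
theorem left_build (words : List String) (hw : words ≠ []) (k : Nat) (hk : k ≤ words.length / 2) :
    (PySem.List.pyRange 1 ((k : Int) + 1) 1).foldl
      (fun left j => left ++ [((PySem.List.pyGet? words (((words.length / 2 : Nat) : Int) - j)).getD "") ++ " " ++ ((PySem.List.pyGet? left (j - 1)).getD "")])
      [(PySem.List.pyGet? words ((words.length / 2 : Nat) : Int)).getD ""]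
    = (List.range (k + 1)).map (LstrF words) := by
  have hm : 0 < words.length := List.length_pos_of_ne_nil hw
  have hh : words.length / 2 < words.length := Nat.div_lt_self hm (by omega)
  induction k with
  | zero =>
    rw [PySem.List.pyRange_one_eq_nil (by omega)]
    simp only [List.foldl_nil]
    congr 1
    rw [PySem.List.pyGet?_ofNat words _ hh]
    rw [LstrF, Nat.sub_zero, List.drop_eq_getElem_cons hh]
    simp only [List.take_succ_cons, List.take_zero]
    apply String.toList_inj.mp
    rw [PySem.Str.toList_join]
    simp [PySem.Chars.join_singleton]
  | succ k ih =>
    have ih' := ih (by omega)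
    rw [show ((k+1 : Nat) : Int) + 1 = ((k : Int) + 1) + 1 from by push_cast; ring,
      PySem.List.pyRange_one_succ_right (by omega), List.foldl_append, ih']
    simp only [List.foldl_cons, List.foldl_nil]
    have hgetk : (List.map (LstrF words) (List.range (k+1)))[k]'(by simp) = LstrF words k := by
      simp
    have hidx : (((words.length / 2 : Nat) : Int) - (((k:Int))+1)) = ((words.length / 2 - (k+1) : Nat) : Int) := by push_cast; omega
    rw [hidx, PySem.List.pyGet?_ofNat words _ (by omega)]
    have hidx2 : ((k : Int) + 1 - 1) = ((k : Nat) : Int) := by ring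
    rw [hidx2, PySem.List.pyGet?_ofNat _ k (by simp)]
    simp only [Option.getD_some, hgetk]
    conv_rhs => rw [List.range_succ, List.map_append, List.range_succ, List.map_append]
    simp only [List.map_cons, List.map_nil, List.append_assoc]
    have hstr : words[words.length / 2 - (k+1)]'(by omega) ++ " " ++ LstrF words k = LstrF words (k+1) := by
      apply String.toList_inj.mp
      have hlt : words.length / 2 - (k+1) < words.length := by omega
      rw [LstrF, LstrF, List.drop_eq_getElem_cons hlt,
        show words.length / 2 - (k+1) + 1 = words.length / 2 - k from by omega,
        List.take_succ_cons]
      simp only [String.toList_append, PySem.Str.toList_join, List.map_cons]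
      have htail : ((words.drop (words.length / 2 - k)).take (k + 1)).map String.toList ≠ [] := by
        simp only [ne_eq, ← List.length_eq_zero_iff, List.length_map, List.length_take, List.length_drop]
        omega
      obtain ⟨y, t, hyt⟩ := List.exists_cons_of_ne_nil htail
      rw [hyt, PySem.Chars.join_cons_cons, ← hyt]
    rw [hstr]
    simp [List.range_succ, List.append_assoc]

-- the right table built by B's second loop is the table of right extensions
theorem rsp_build (words : List String) (hw : words ≠ []) (k : Nat) (hk : k ≤ words.length - 1 - words.length / 2) :
    (PySem.List.pyRange 1 ((k : Int) + 1) 1).foldl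
      (fun rsp r => rsp ++ [((PySem.List.pyGet? rsp (r - 1)).getD "") ++ " " ++ ((PySem.List.pyGet? words (((words.length / 2 : Nat) : Int) + r)).getD "")])
      [""]
    = (List.range (k + 1)).map (fun r => String.ofList (RtlF words r)) := by
  have hm : 0 < words.length := List.length_pos_of_ne_nil hw
  induction k with
  | zero =>
    rw [PySem.List.pyRange_one_eq_nil (by omega)]
    rfl
  | succ k ih =>
    have ih' := ih (by omega)
    rw [show ((k+1 : Nat) : Int) + 1 = ((k : Int) + 1) + 1 from by push_cast; ring,
      PySem.List.pyRange_one_succ_right (by omega), List.foldl_append, ih']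
    simp only [List.foldl_cons, List.foldl_nil]
    have hidx2 : ((k : Int) + 1 - 1) = ((k : Nat) : Int) := by ring
    rw [hidx2, PySem.List.pyGet?_ofNat _ k (by simp)]
    have hidx : (((words.length / 2 : Nat) : Int) + ((k:Int)+1)) = ((words.length / 2 + (k+1) : Nat) : Int) := by push_cast; ring
    rw [hidx, PySem.List.pyGet?_ofNat words _ (by omega)]
    have hgetk : (List.map (fun r => String.ofList (RtlF words r)) (List.range (k+1)))[k]'(by simp) = String.ofList (RtlF words k) := by
      simp
    simp only [Option.getD_some, hgetk]
    have hstr : String.ofList (RtlF words k) ++ " " ++ words[words.length / 2 + (k+1)]'(by omega)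
        = String.ofList (RtlF words (k+1)) := by
      apply String.toList_inj.mp
      simp only [String.toList_append, String.toList_ofList]
      rw [RtlF, RtlF, List.take_add_one]
      have hget : (words.drop (words.length / 2 + 1))[k]? = some (words[words.length / 2 + 1 + k]'(by omega)) := by
        rw [List.getElem?_drop]
        exact List.getElem?_eq_getElem (by omega)
      rw [hget]
      simp only [Option.toList_some, List.map_append, List.map_cons, List.map_nil,
        List.flatMap_append, List.flatMap_cons, List.flatMap_nil]
      have : words.length / 2 + 1 + k = words.length / 2 + (k+1) := by omega
      simp [this, List.append_assoc]
    rw [hstr]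
    simp [List.range_succ, List.append_assoc]

-- stage 2: the clipped join-slice fold equals B's table-lookup fold
theorem tables_eq (words refer : List String) (mw : Int) (hw : words ≠ []) :
    List.foldl (fun vector nsize =>
      List.foldl (fun vector i =>
        vector ++ [if PySem.Str.join " " (PySem.List.slice words (some i) (some (i + nsize))) ∈ refer then (1:Int) else 0])
        vector (PySem.List.pyRange (max 0 (((words.length / 2 : Nat) : Int) - nsize + 1))
          (min ((words.length / 2 : Nat) : Int) ((words.length : Int) - nsize) + 1) 1))
      [] (PySem.List.pyRange (min mw (words.length : Int)) 0 (-1))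
    = List.foldl (fun vector nsize =>
      List.foldl (fun vector i =>
        vector ++ [if ((PySem.List.pyGet? ((List.range (words.length / 2 + 1)).map (LstrF words)) (((words.length / 2 : Nat) : Int) - i)).getD ""
              ++ (PySem.List.pyGet? ((List.range (words.length - 1 - words.length / 2 + 1)).map (fun r => String.ofList (RtlF words r))) (i + nsize - 1 - ((words.length / 2 : Nat) : Int))).getD "") ∈ PySem.Set.ofList refer then (1:Int) else 0])
        vector (PySem.List.pyRange (max 0 (((words.length / 2 : Nat) : Int) - nsize + 1))
          (min ((words.length / 2 : Nat) : Int) ((words.length : Int) - nsize) + 1) 1))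
      [] (PySem.List.pyRange (min mw (words.length : Int)) 0 (-1)) := by
  have hm : 0 < words.length := List.length_pos_of_ne_nil hw
  apply PySem.List.foldl_congr_mem
  intro acc nsize hns
  rw [PySem.List.mem_pyRange_neg_one] at hns
  apply PySem.List.foldl_congr_mem
  intro acc2 i hi
  rw [PySem.List.mem_pyRange_one] at hi
  have h0i : 0 ≤ i := by omega
  have h0n : 0 ≤ nsize := by omega
  lift i to ℕ using h0i with iN
  lift nsize to ℕ using h0n with kN
  have hb1 : iN ≤ words.length / 2 := by omega
  have hb2 : words.length / 2 < iN + kN := by omega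
  have hb3 : iN + kN ≤ words.length := by omega
  have hleft : (PySem.List.pyGet? ((List.range (words.length / 2 + 1)).map (LstrF words))
      (((words.length / 2 : Nat) : Int) - (iN : Int))).getD "" = LstrF words (words.length / 2 - iN) := by
    rw [show (((words.length / 2 : Nat) : Int) - (iN : Int)) = ((words.length / 2 - iN : Nat) : Int) from by push_cast; omega,
      PySem.List.pyGet?_ofNat _ _ (by simp only [List.length_map, List.length_range]; omega)]
    simp
  have hrsp : (PySem.List.pyGet? ((List.range (words.length - 1 - words.length / 2 + 1)).map (fun r => String.ofList (RtlF words r)))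
      ((iN : Int) + (kN : Int) - 1 - ((words.length / 2 : Nat) : Int))).getD "" = String.ofList (RtlF words (iN + kN - 1 - words.length / 2)) := by
    rw [show ((iN : Int) + (kN : Int) - 1 - ((words.length / 2 : Nat) : Int)) = ((iN + kN - 1 - words.length / 2 : Nat) : Int) from by push_cast; omega,
      PySem.List.pyGet?_ofNat _ _ (by simp only [List.length_map, List.length_range]; omega)]
    simp
  rw [hleft, hrsp]
  have hslice : PySem.List.slice words (some (iN : Int)) (some ((iN : Int) + (kN : Int)))
      = (words.drop iN).take kN := by
    rw [show ((iN : Int) + (kN : Int)) = ((iN + kN : Nat) : Int) from by push_cast; ring,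
      PySem.List.slice_natCast]
    congr 1
    omega
  have hs : LstrF words (words.length / 2 - iN) ++ String.ofList (RtlF words (iN + kN - 1 - words.length / 2))
      = PySem.Str.join " " (PySem.List.slice words (some (iN : Int)) (some ((iN : Int) + (kN : Int)))) := by
    apply String.toList_inj.mp
    rw [hslice, window_split words iN kN hb1 hb2 hb3]
    simp
  rw [hs]
  simp [PySem.Set.mem_ofList]

-- ===== VERDICT (by name: the statement is the Claim_ definition above) =====
theorem get_dict_feature_spec : Claim_equal_get_dict_feature := by
  intro s refer mw _
  unfold Spec_get_dict_feature get_dict_feature get_dict_feature_alt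
  simp only [PySem.List.len_eq, floordiv_two_cast]
  by_cases hw : PySem.Str.split₀ s = []
  · rw [if_pos (by rw [hw]; rfl)]
    apply foldl_fixpoint
    intro v x hx
    rw [PySem.List.mem_pyRange_neg_one] at hx
    rw [hw]
    rw [PySem.List.pyRange_one_eq_nil (by simp; omega)]
    rfl
  · have hm : 0 < (PySem.Str.split₀ s).length := List.length_pos_of_ne_nil hw
    rw [if_neg (by simpa using (by omega : ¬ ((PySem.Str.split₀ s).length : Int) = 0))]
    rw [show ((((PySem.Str.split₀ s).length : Nat) : Int) - (((PySem.Str.split₀ s).length / 2 : Nat) : Int))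
        = (((PySem.Str.split₀ s).length - 1 - (PySem.Str.split₀ s).length / 2 : Nat) : Int) + 1 from by omega]
    rw [left_build _ hw _ (le_refl _), rsp_build _ hw _ (le_refl _)]
    exact (fold_eq (PySem.Str.split₀ s) refer mw).trans (tables_eq _ refer mw hw)
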